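-- pv_equiv track=rewrite | github.com/DepontiMichele/Portfolio | password_tools.py | calcola_punteggio
-- ===== SOURCE A (Python) =====
-- import string
--
-- PUNTI_PER_CARATTERE = 1
--
-- BONUS_MAIUSCOLE = 5
--
-- BONUS_NUMERI = 5
--
-- BONUS_SIMBOLI = 7
--
-- def analizza_composizione(password):
--     # Returns a dictionary with the count of each character type
--     return {
--         "lunghezza": len(password),
--         "maiuscole": sum(1 for c in password if c.isupper()),
--         "minuscole": sum(1 for c in password if c.islower()),
--         "numeri":    sum(1 for c in password if c.isdigit()),
--         "simboli":   sum(1 for c in password if c in string.punctuation),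
--     }
--
-- def calcola_punteggio(password):
--     comp = analizza_composizione(password)
--
--     # Base score: one point per character
--     punteggio = comp["lunghezza"] * PUNTI_PER_CARATTERE
--
--     # Bonus for each category present (at least one character of that type)
--     if comp["maiuscole"] > 0:
--         punteggio += BONUS_MAIUSCOLE
--     if comp["numeri"] > 0:
--         punteggio += BONUS_NUMERI
--     if comp["simboli"] > 0:
--         punteggio += BONUS_SIMBOLI
--
--     # Variety bonus: the more different categories are present, the more points.
--     # "lunghezza" is excluded because it is not a character category.
--     tipi_usati = sum(1 for k, v in comp.items() if k != "lunghezza" and v > 0)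
--     punteggio += tipi_usati * 2
--
--     return min(punteggio, 100)  # score is capped at 100
-- ===== SOURCE B (Python) =====
-- import string
--
-- def calcola_punteggio(password):
--     # One pass with four presence flags; no intermediate count dictionary.
--     has_upper = has_lower = has_digit = has_symbol = False
--     for c in password:
--         if c.isupper():
--             has_upper = True
--         elif c.islower():
--             has_lower = True
--         elif c.isdigit():
--             has_digit = True
--         elif c in string.punctuation:
--             has_symbol = True
--     punteggio = len(password)
--     if has_upper:
--         punteggio += 5 + 2
--     if has_lower:
--         punteggio += 2
--     if has_digit:
--         punteggio += 5 + 2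
--     if has_symbol:
--         punteggio += 7 + 2
--     return min(punteggio, 100)
-- ===== Notes on version B (the rewrite author's own statement) =====
-- stated objective: simpler
-- what changed: Replaced the five-pass count dictionary plus per-key bonus and variety scans by a single pass over the password maintaining four presence booleans (the categories are mutually exclusive, so elif chaining is sound), folding the presence and variety bonuses into one constant per flag.
import Mathlib
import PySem

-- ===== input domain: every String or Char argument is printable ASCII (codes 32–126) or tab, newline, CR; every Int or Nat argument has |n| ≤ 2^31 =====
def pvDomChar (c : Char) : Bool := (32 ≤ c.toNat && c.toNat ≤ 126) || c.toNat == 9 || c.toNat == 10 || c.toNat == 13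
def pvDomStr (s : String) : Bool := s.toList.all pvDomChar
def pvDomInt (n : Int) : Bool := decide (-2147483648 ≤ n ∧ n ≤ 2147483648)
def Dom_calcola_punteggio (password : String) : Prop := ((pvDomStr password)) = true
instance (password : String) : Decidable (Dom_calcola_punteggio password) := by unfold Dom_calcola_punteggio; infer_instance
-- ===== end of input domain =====

-- B replaces A's five-pass count dictionary by one pass keeping four presence booleans (objective: simpler).

-- ===== PORT A =====
-- string.punctuation
def pvPunct : List Char := "!\"#$%&'()*+,-./:;<=>?@[\\]^_`{|}~".toList

-- sum(1 for c in password if pred(c))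
def pvCountIf (l : List Char) (p : Char → Bool) : Int :=
  l.foldl (fun n c => if p c then n + 1 else n) 0

def analizza_composizione (password : String) : PySem.Dict String Int :=
  ((((PySem.Dict.empty.insert "lunghezza" (PySem.Str.len password)).insert
    "maiuscole" (pvCountIf password.toList PySem.Chars.isupper)).insert
    "minuscole" (pvCountIf password.toList PySem.Chars.islower)).insert
    "numeri" (pvCountIf password.toList PySem.Chars.isdigit)).insert
    "simboli" (pvCountIf password.toList (fun c => pvPunct.contains c))

def calcola_punteggio (password : String) : Int :=
  let comp := analizza_composizione password
  let punteggio := comp.getD "lunghezza" 0 * 1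
  let punteggio := if 0 < comp.getD "maiuscole" 0 then punteggio + 5 else punteggio
  let punteggio := if 0 < comp.getD "numeri" 0 then punteggio + 5 else punteggio
  let punteggio := if 0 < comp.getD "simboli" 0 then punteggio + 7 else punteggio
  let tipi : Int := comp.items.foldl
    (fun n kv => if kv.1 ≠ "lunghezza" ∧ 0 < kv.2 then n + 1 else n) 0
  min (punteggio + tipi * 2) 100

-- ===== PORT B =====
-- the loop body of Source B: elif chain updating the four flags
def pvStep (f : Bool × Bool × Bool × Bool) (c : Char) : Bool × Bool × Bool × Bool :=
  if PySem.Chars.isupper c then (true, f.2)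
  else if PySem.Chars.islower c then (f.1, true, f.2.2)
  else if PySem.Chars.isdigit c then (f.1, f.2.1, true, f.2.2.2)
  else if pvPunct.contains c then (f.1, f.2.1, f.2.2.1, true)
  else f

def calcola_punteggio_alt (password : String) : Int :=
  let fs := password.toList.foldl pvStep (false, false, false, false)
  let punteggio : Int := PySem.Str.len password
  let punteggio := if fs.1 then punteggio + (5 + 2) else punteggio
  let punteggio := if fs.2.1 then punteggio + 2 else punteggio
  let punteggio := if fs.2.2.1 then punteggio + (5 + 2) else punteggio
  let punteggio := if fs.2.2.2 then punteggio + (7 + 2) else punteggio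
  min punteggio 100

-- ===== PRECONDITION & SPEC =====
def Spec_calcola_punteggio (password : String) (out : Int) : Prop := out = calcola_punteggio_alt password
instance (password : String) (out : Int) : Decidable (Spec_calcola_punteggio password out) := by unfold Spec_calcola_punteggio; infer_instance

-- ===== CLAIM (what is proved, stated in full; the proofs are below) =====
def Claim_equal_calcola_punteggio : Prop := ∀ (password : String), Dom_calcola_punteggio password → Spec_calcola_punteggio password (calcola_punteggio password)

-- ===== LEMMAS AND PROOFS =====

theorem pvCountIf_eq (l : List Char) (p : Char → Bool) (n : Int) :
    l.foldl (fun n c => if p c then n + 1 else n) n = n + (l.countP p : Int) := by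
  induction l generalizing n with
  | nil => simp [List.countP]
  | cons c t ih =>
    by_cases h : p c = true <;> simp [List.foldl, h, ih, List.countP_cons] <;> ring

theorem pvCountIf_pos (l : List Char) (p : Char → Bool) :
    (0 < pvCountIf l p) ↔ l.any p = true := by
  unfold pvCountIf
  rw [pvCountIf_eq]
  simp [List.countP_pos_iff, List.any_eq_true]

theorem lower_not_upper (c : Char) (h : PySem.Chars.islower c = true) :
    PySem.Chars.isupper c = false := by
  rw [Bool.eq_false_iff]
  intro h2
  simp only [PySem.Chars.islower, PySem.Chars.isupper, Char.le_def,
    UInt32.le_iff_toNat_le, Bool.and_eq_true, decide_eq_true_eq] at h h2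
  have : ('a').val.toNat = 97 := rfl
  have : ('z').val.toNat = 122 := rfl
  have : ('A').val.toNat = 65 := rfl
  have : ('Z').val.toNat = 90 := rfl
  omega

theorem digit_not_upper (c : Char) (h : PySem.Chars.isdigit c = true) :
    PySem.Chars.isupper c = false := by
  rw [Bool.eq_false_iff]
  intro h2
  simp only [PySem.Chars.isdigit, PySem.Chars.isupper, Char.le_def,
    UInt32.le_iff_toNat_le, Bool.and_eq_true, decide_eq_true_eq] at h h2
  have : ('0').val.toNat = 48 := rfl
  have : ('9').val.toNat = 57 := rfl
  have : ('A').val.toNat = 65 := rfl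
  have : ('Z').val.toNat = 90 := rfl
  omega

theorem digit_not_lower (c : Char) (h : PySem.Chars.isdigit c = true) :
    PySem.Chars.islower c = false := by
  rw [Bool.eq_false_iff]
  intro h2
  simp only [PySem.Chars.isdigit, PySem.Chars.islower, Char.le_def,
    UInt32.le_iff_toNat_le, Bool.and_eq_true, decide_eq_true_eq] at h h2
  have : ('0').val.toNat = 48 := rfl
  have : ('9').val.toNat = 57 := rfl
  have : ('a').val.toNat = 97 := rfl
  have : ('z').val.toNat = 122 := rfl
  omega

theorem punct_not_other (c : Char) (h : pvPunct.contains c = true) :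
    PySem.Chars.isupper c = false ∧ PySem.Chars.islower c = false ∧
      PySem.Chars.isdigit c = false := by
  have key : pvPunct.all (fun d => !PySem.Chars.isupper d && !PySem.Chars.islower d &&
      !PySem.Chars.isdigit d) = true := by decide
  have hm : c ∈ pvPunct := by simpa using h
  have := List.all_eq_true.mp key c hm
  simp only [Bool.and_eq_true, Bool.not_eq_true'] at this
  exact ⟨this.1.1, this.1.2, this.2⟩

theorem not_false_of_true {p q : Char → Bool} (imp : ∀ c, p c = true → q c = false)
    (c : Char) (h : q c = true) : p c = false := by
  by_contra hh
  simp at hh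
  exact absurd (imp c hh) (by simp [h])

theorem pvStep_fold (l : List Char) (a b c d : Bool) :
    l.foldl pvStep (a, b, c, d) =
      (a || l.any PySem.Chars.isupper,
       b || l.any PySem.Chars.islower,
       c || l.any PySem.Chars.isdigit,
       d || l.any (fun x => pvPunct.contains x)) := by
  induction l generalizing a b c d with
  | nil => simp
  | cons x t ih =>
    simp only [List.foldl, List.any_cons]
    by_cases hU : PySem.Chars.isupper x = true
    · have hL := not_false_of_true lower_not_upper x hU
      have hD := not_false_of_true digit_not_upper x hU
      have hS := not_false_of_true (fun c h => (punct_not_other c h).1) x hU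
      simp only [List.contains_eq_mem] at hS
      simp [pvStep, hU, hL, hD, hS, ih, Bool.or_assoc]
    · by_cases hL : PySem.Chars.islower x = true
      · have hD := not_false_of_true digit_not_lower x hL
        have hS := not_false_of_true (fun c h => (punct_not_other c h).2.1) x hL
        simp only [List.contains_eq_mem] at hS
        simp [pvStep, hU, hL, hD, hS, ih, Bool.or_assoc]
      · by_cases hD : PySem.Chars.isdigit x = true
        · have hS := not_false_of_true (fun c h => (punct_not_other c h).2.2) x hD
          simp only [List.contains_eq_mem] at hS
          simp [pvStep, hU, hL, hD, hS, ih, Bool.or_assoc]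
        · by_cases hS : pvPunct.contains x = true
          · simp only [List.contains_eq_mem] at hS
            simp [pvStep, hU, hL, hD, hS, ih, Bool.or_assoc, List.contains_eq_mem]
          · simp only [List.contains_eq_mem] at hS
            simp only [Bool.not_eq_true] at hS
            simp [pvStep, hU, hL, hD, hS, ih, List.contains_eq_mem]

-- ===== VERDICT (by name: the statement is the Claim_ definition above) =====
theorem calcola_punteggio_spec : Claim_equal_calcola_punteggio := by
  intro password _
  unfold Spec_calcola_punteggio calcola_punteggio calcola_punteggio_alt analizza_composizione
  rw [pvStep_fold]
  have hempty : (PySem.Dict.empty : PySem.Dict String Int).items = [] := rfl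
  have hk1 : ("lunghezza":String) ≠ "maiuscole" := by decide
  have hk2 : ("lunghezza":String) ≠ "minuscole" := by decide
  have hk3 : ("lunghezza":String) ≠ "numeri" := by decide
  have hk4 : ("lunghezza":String) ≠ "simboli" := by decide
  have hk5 : ("maiuscole":String) ≠ "lunghezza" := by decide
  have hk6 : ("maiuscole":String) ≠ "minuscole" := by decide
  have hk7 : ("maiuscole":String) ≠ "numeri" := by decide
  have hk8 : ("maiuscole":String) ≠ "simboli" := by decide
  have hk9 : ("minuscole":String) ≠ "lunghezza" := by decide
  have hk10 : ("minuscole":String) ≠ "maiuscole" := by decide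
  have hk11 : ("minuscole":String) ≠ "numeri" := by decide
  have hk12 : ("minuscole":String) ≠ "simboli" := by decide
  have hk13 : ("numeri":String) ≠ "lunghezza" := by decide
  have hk14 : ("numeri":String) ≠ "maiuscole" := by decide
  have hk15 : ("numeri":String) ≠ "minuscole" := by decide
  have hk16 : ("numeri":String) ≠ "simboli" := by decide
  have hk17 : ("simboli":String) ≠ "lunghezza" := by decide
  have hk18 : ("simboli":String) ≠ "maiuscole" := by decide
  have hk19 : ("simboli":String) ≠ "minuscole" := by decide
  have hk20 : ("simboli":String) ≠ "numeri" := by decide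
  simp only [PySem.Dict.getD_insert, PySem.Dict.items_insert, PySem.Dict.contains_insert,
    PySem.Dict.contains_empty, hempty, hk1, hk2, hk3, hk4, hk5, hk6, hk7, hk8, hk9, hk10, hk11, hk12, hk13, hk14, hk15, hk16, hk17, hk18, hk19, hk20, if_true, if_false, ite_true,
    ite_false, if_neg, if_pos, ne_eq, not_false_iff, List.foldl, beq_iff_eq, Bool.or_eq_true,
    decide_eq_true_eq, or_false, false_or]
  simp only [pvCountIf_pos, Bool.false_or]
  by_cases hU : ∃ x ∈ password.toList, PySem.Chars.isupper x = true <;>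
  by_cases hL : ∃ x ∈ password.toList, PySem.Chars.islower x = true <;>
  by_cases hD : ∃ x ∈ password.toList, PySem.Chars.isdigit x = true <;>
  by_cases hS : ∃ x ∈ password.toList, x ∈ pvPunct <;>
  simp [hU, hL, hD, hS, pvCountIf_pos, hk1, hk5, hk9, hk13, hk17] <;>
  omega
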